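-- pv_equiv track=rewrite | github.com/hashberg-io/pauliopt | pauliopt/phase/phase_circuits.py | _int_to_frozenset
-- ===== SOURCE A (Python) =====
-- from typing import (Any, Callable, cast, Collection, Dict, FrozenSet, Iterator, List,
--                     Literal, Mapping, Optional, overload, Sequence, Set, Tuple, Union)
--
-- def _int_to_frozenset(i: int) -> FrozenSet[int]:
--     s: List[int] = []
--     x = 0
--     while i != 0:
--         if i % 2 == 1:
--             s.append(x)
--         i //= 2
--         x += 1
--     return frozenset(s)
-- ===== SOURCE B (Python) =====
-- def _int_to_frozenset(i: int):
--     # read the bit positions off the binary string produced by bin(), LSB first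
--     return frozenset(j for j, c in enumerate(reversed(bin(i)[2:])) if c == '1')
-- ===== Notes on version B (the rewrite author's own statement) =====
-- stated objective: idiomatic
-- what changed: B enumerates the reversed digit string produced by bin(i) and collects the positions of '1' characters, instead of A's while-loop maintaining a running quotient and bit counter with repeated // and %.
-- outside the precondition, e.g. on _int_to_frozenset(-5): A does not finish within the time limit, B returns {0, 2}
import Mathlib
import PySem

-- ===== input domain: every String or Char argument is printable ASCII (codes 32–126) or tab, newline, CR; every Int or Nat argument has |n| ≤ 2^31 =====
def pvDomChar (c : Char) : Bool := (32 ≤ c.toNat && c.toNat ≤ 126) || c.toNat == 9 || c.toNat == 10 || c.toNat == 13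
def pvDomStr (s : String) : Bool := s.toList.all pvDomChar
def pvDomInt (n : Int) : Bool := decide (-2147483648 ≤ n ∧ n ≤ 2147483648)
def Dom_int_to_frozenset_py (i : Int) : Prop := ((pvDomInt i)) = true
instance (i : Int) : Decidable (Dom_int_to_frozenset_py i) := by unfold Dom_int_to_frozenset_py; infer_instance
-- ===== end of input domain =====

-- B reads the bit positions off the reversed binary digit string produced by bin(i), instead of
-- A's while-loop with a running quotient and bit counter (idiomatic; equal cost).


-- ===== PORT A =====
-- the 'while i != 0' loop; for i < 0 Python never terminates (excluded by Pre_), so the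
-- guard returns s there to make the Lean function total — faithful on all i ≥ 0
def pyWhileA (i x : Int) (s : List Int) : List Int :=
  if i ≤ 0 then s
  else pyWhileA (PySem.Int.floordiv i 2) (x + 1)
         (if PySem.Int.mod i 2 = 1 then s ++ [x] else s)
termination_by i.toNat
decreasing_by
  rename_i h
  rw [PySem.Int.floordiv_eq_ediv_of_pos (by omega)]
  omega

def int_to_frozenset_py (i : Int) : List Int :=
  PySem.Set.ofList (pyWhileA i 0 [])

-- ===== PORT B =====
-- binary digits of n, most-significant first: exactly the characters bin() writes after the
-- prefix for n > 0 (hand port of the bin builtin's digit production; exact for n > 0)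
def pyBinDigits (n : Nat) : List Char :=
  if n = 0 then [] else pyBinDigits (n / 2) ++ [if n % 2 = 1 then '1' else '0']

-- bin(i) as a character list; exact: sign, then the '0b' prefix, then the digits (a single zero digit when no set bits)
def pyBin (i : Int) : List Char :=
  if i < 0 then '-' :: '0' :: 'b' :: pyBinDigits i.natAbs
  else if i = 0 then ['0', 'b', '0']
  else '0' :: 'b' :: pyBinDigits i.natAbs

def int_to_frozenset_py_alt (i : Int) : List Int :=
  -- frozenset(j for j, c in enumerate(reversed(bin(i)[2:])) if c == '1')
  PySem.Set.ofList
    ((PySem.List.enumerate (PySem.List.slice (pyBin i) (some 2) none).reverse 0).filterMap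
      (fun p => if p.2 = '1' then some p.1 else none))

-- ===== PRECONDITION & SPEC =====
-- Pre_ excludes i < 0, on which A's while-loop never terminates (i //= 2 stalls at -1).
def Pre_int_to_frozenset_py (i : Int) : Prop := 0 ≤ i
instance (i : Int) : Decidable (Pre_int_to_frozenset_py i) := by unfold Pre_int_to_frozenset_py; infer_instance
def pvWitness_int_to_frozenset_py : Int := 6

def Spec_int_to_frozenset_py (i : Int) (out : List Int) : Prop := out = int_to_frozenset_py_alt i
instance (i : Int) (out : List Int) : Decidable (Spec_int_to_frozenset_py i out) := by unfold Spec_int_to_frozenset_py; infer_instance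

-- ===== CLAIM (what is proved, stated in full; the proofs are below) =====
def Claim_equal_int_to_frozenset_py : Prop := ∀ (i : Int), Dom_int_to_frozenset_py i → Pre_int_to_frozenset_py i → Spec_int_to_frozenset_py i (int_to_frozenset_py i)

-- ===== LEMMAS AND PROOFS =====

-- the list of set bit positions of n, offset by x (LSB first) — the common value of both loops
def posList (n : Nat) (x : Int) : List Int :=
  if n = 0 then [] else (if n % 2 = 1 then [x] else []) ++ posList (n / 2) (x + 1)

theorem pyWhileA_eq_posList (n : Nat) : ∀ (x : Int) (s : List Int),
    pyWhileA (n : Int) x s = s ++ posList n x := by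
  induction n using Nat.strong_induction_on with
  | _ n ih =>
    intro x s
    rw [pyWhileA, posList]
    by_cases h : n = 0
    · simp [h]
    · have hpos : ¬ ((n : Int) ≤ 0) := by omega
      rw [if_neg hpos, if_neg h]
      rw [show PySem.Int.floordiv (n : Int) 2 = ((n / 2 : Nat) : Int) from
        PySem.Int.floordiv_natCast n 2]
      rw [ih (n / 2) (Nat.div_lt_self (Nat.pos_of_ne_zero h) (by omega))]
      rw [show PySem.Int.mod (n : Int) 2 = ((n % 2 : Nat) : Int) from
        PySem.Int.mod_natCast n 2]
      by_cases hm : n % 2 = 1 <;> simp [hm] <;> omega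

theorem enumerate_reverse_binDigits (n : Nat) : ∀ (x : Int),
    (PySem.List.enumerate (pyBinDigits n).reverse x).filterMap
      (fun p => if p.2 = '1' then some p.1 else none) = posList n x := by
  induction n using Nat.strong_induction_on with
  | _ n ih =>
    intro x
    rw [pyBinDigits, posList]
    by_cases h : n = 0
    · simp [h]
    · rw [if_neg h, if_neg h]
      rw [List.reverse_append, List.reverse_singleton, List.singleton_append,
        PySem.List.enumerate_cons, List.filterMap_cons]
      rw [ih (n / 2) (Nat.div_lt_self (Nat.pos_of_ne_zero h) (by omega))]
      by_cases hm : n % 2 = 1 <;> simp [hm]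

-- ===== VERDICT (by name: the statement is the Claim_ definition above) =====
theorem int_to_frozenset_py_spec : Claim_equal_int_to_frozenset_py := by
  intro i _ hpre
  unfold Pre_int_to_frozenset_py at hpre
  unfold Spec_int_to_frozenset_py int_to_frozenset_py int_to_frozenset_py_alt
  obtain ⟨n, rfl⟩ : ∃ n : Nat, i = (n : Int) := ⟨i.toNat, by omega⟩
  by_cases h : n = 0
  · subst h; simp only [Nat.cast_zero]
    have hA : pyWhileA 0 0 [] = [] := by rw [pyWhileA]; simp
    rw [hA]; decide
  · have hlt : ¬ ((n : Int) < 0) := by omega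
    have hne : ¬ ((n : Int) = 0) := by omega
    rw [pyBin, if_neg hlt, if_neg hne, Int.natAbs_natCast]
    rw [show PySem.List.slice ('0' :: 'b' :: pyBinDigits n) (some 2) none = pyBinDigits n from by
      simp [PySem.List.slice, PySem.List.clampIdx]]
    rw [enumerate_reverse_binDigits n 0, pyWhileA_eq_posList n 0 [], List.nil_append]
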